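-- pv_equiv track=rewrite | github.com/wubugui/GameDraft | tools/chronicle_sim_v3/nodes/event/__init__.py | _actors_union
-- ===== SOURCE A (Python) =====
-- from typing import Any
--
-- def _actors_union(event: dict) -> list[str]:
--     out: list[str] = []
--     seen: set[str] = set()
--
--     def _add(v: Any) -> None:
--         if isinstance(v, str) and v and v not in seen:
--             seen.add(v)
--             out.append(v)
--         elif isinstance(v, list):
--             for x in v:
--                 _add(x)
--
--     _add(event.get("actor"))
--     _add(event.get("actors"))
--     _add(event.get("related"))
--     _add(event.get("witness"))
--     _add(event.get("witnesses"))
--     # tier_b_group 展开：catalog 描述说明这一字段是 group_id；P3 才有真实分组数据，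
--     # 这里把 group_id 作为虚拟成员留住，下游 filter 时按需要忽略
--     grp = event.get("tier_b_group")
--     if grp:
--         _add(f"group:{grp}" if isinstance(grp, str) else grp)
--     return out
-- ===== SOURCE B (Python) =====
-- def _actors_union(event: dict) -> list[str]:
--     # Assemble the ordered candidate values first, then flatten with an explicit stack.
--     cands = [event.get(k) for k in ("actor", "actors", "related", "witness", "witnesses")]
--     grp = event.get("tier_b_group")
--     if grp:
--         cands.append(f"group:{grp}" if isinstance(grp, str) else grp)
--     out: list[str] = []
--     seen: set[str] = set()
--     stack = list(reversed(cands))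
--     while stack:
--         v = stack.pop()
--         if isinstance(v, str) and v and v not in seen:
--             seen.add(v)
--             out.append(v)
--         elif isinstance(v, list):
--             stack.extend(reversed(v))
--     return out
-- ===== Notes on version B (the rewrite author's own statement) =====
-- stated objective: alternative
-- what changed: Replaces the recursive _add helper threaded through six separate calls with a two-phase design: first build the ordered candidate list (fields plus the conditional group value), then drive one explicit stack loop that dedups and flattens.
import Mathlib
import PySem

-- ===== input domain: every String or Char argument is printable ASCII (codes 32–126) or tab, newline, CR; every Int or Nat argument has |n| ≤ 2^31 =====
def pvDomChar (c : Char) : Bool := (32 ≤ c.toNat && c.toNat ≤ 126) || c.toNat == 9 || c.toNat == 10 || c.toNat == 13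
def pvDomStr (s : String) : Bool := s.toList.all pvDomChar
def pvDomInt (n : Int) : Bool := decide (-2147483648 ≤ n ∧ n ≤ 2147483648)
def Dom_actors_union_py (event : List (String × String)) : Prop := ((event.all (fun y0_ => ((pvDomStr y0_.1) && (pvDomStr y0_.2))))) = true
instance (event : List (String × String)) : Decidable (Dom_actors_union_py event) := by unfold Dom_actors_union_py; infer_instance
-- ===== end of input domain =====

-- B builds the ordered candidate list first, then dedups it in one explicit stack loop,
-- instead of A's recursive _add helper called six times; alternative decomposition, same cost.


-- ===== PORT A =====
-- _add on an Option String value (in this dict the values are plain strings, never lists)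
def pvAddA (st : List String × PySem.Set String) (v : Option String) : List String × PySem.Set String :=
  match v with
  | some s => if s ≠ "" && !(PySem.Set.contains st.2 s) then (st.1 ++ [s], PySem.Set.add st.2 s) else st
  | none => st

def actors_union_py (event : List (String × String)) : List String :=
  let d := PySem.Dict.mk event
  let st0 : List String × PySem.Set String := ([], PySem.Set.empty)
  let st1 := pvAddA st0 (d.get? "actor")
  let st2 := pvAddA st1 (d.get? "actors")
  let st3 := pvAddA st2 (d.get? "related")
  let st4 := pvAddA st3 (d.get? "witness")
  let st5 := pvAddA st4 (d.get? "witnesses")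
  let st6 := match d.get? "tier_b_group" with
    | some g => if g ≠ "" then pvAddA st5 (some ("group:" ++ g)) else st5
    | none => st5
  st6.1

-- ===== PORT B =====
-- the stack loop of Source B: pop the top candidate; a non-empty unseen string is emitted
def pvLoopB (stack : List (Option String)) (out : List String) (seen : PySem.Set String) : List String :=
  match stack with
  | [] => out
  | v :: rest =>
    match v with
    | some s =>
      if s ≠ "" && !(PySem.Set.contains seen s) then pvLoopB rest (out ++ [s]) (PySem.Set.add seen s)
      else pvLoopB rest out seen
    | none => pvLoopB rest out seen

def actors_union_py_alt (event : List (String × String)) : List String :=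
  let d := PySem.Dict.mk event
  let cands := (["actor", "actors", "related", "witness", "witnesses"].map d.get?)
  let cands := match d.get? "tier_b_group" with
    | some g => if g ≠ "" then cands ++ [some ("group:" ++ g)] else cands
    | none => cands
  pvLoopB cands [] PySem.Set.empty

-- ===== PRECONDITION & SPEC =====
def Spec_actors_union_py (event : List (String × String)) (out : List String) : Prop := out = actors_union_py_alt event
instance (event : List (String × String)) (out : List String) : Decidable (Spec_actors_union_py event out) := by unfold Spec_actors_union_py; infer_instance

-- ===== CLAIM (what is proved, stated in full; the proofs are below) =====
def Claim_equal_actors_union_py : Prop := ∀ (event : List (String × String)), Dom_actors_union_py event → Spec_actors_union_py event (actors_union_py event)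

-- ===== LEMMAS AND PROOFS =====

-- one stack step of B is one _add step of A
theorem pvLoopB_cons (v : Option String) (rest : List (Option String)) (out : List String) (seen : PySem.Set String) :
    pvLoopB (v :: rest) out seen = pvLoopB rest (pvAddA (out, seen) v).1 (pvAddA (out, seen) v).2 := by
  cases v with
  | none => simp [pvLoopB, pvAddA]
  | some s =>
    simp only [pvLoopB, pvAddA]
    split_ifs <;> rfl

theorem pvLoopB_nil (out : List String) (seen : PySem.Set String) : pvLoopB [] out seen = out := rfl

-- ===== VERDICT (by name: the statement is the Claim_ definition above) =====
theorem actors_union_py_spec : Claim_equal_actors_union_py := by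
  intro event _
  unfold Spec_actors_union_py actors_union_py actors_union_py_alt
  simp only [List.map]
  cases h : (PySem.Dict.mk event).get? "tier_b_group" with
  | none =>
    simp only [pvLoopB_cons, pvLoopB_nil]
  | some g =>
    dsimp only
    split_ifs with hg
    · simp only [List.cons_append, List.nil_append, pvLoopB_cons, pvLoopB_nil]
    · simp only [pvLoopB_cons, pvLoopB_nil]
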